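-- pv_equiv track=rewrite | github.com/Rollpopptery/circuitbloom | gen_pcb.py | remove_sexp_blocks
-- ===== SOURCE A (Python) =====
-- def remove_sexp_blocks(text, tag):
--     """
--     Remove all top-level s-expression blocks starting with (tag ...),
--     using depth counting to handle multi-line nested blocks correctly.
--     Also strips any leading whitespace/newlines before each removed block.
--     """
--     search = f'({tag}'
--     slen = len(search)
--     result = []
--     i = 0
--     while i < len(text):
--         # Match (tag followed by any whitespace — KiCad uses newline, not space
--         if (text[i:i+slen] == search
--                 and i + slen < len(text)
--                 and text[i+slen] in ' \t\n\r'):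
--             # Find the matching closing paren
--             depth = 0
--             j = i
--             while j < len(text):
--                 if text[j] == '(':
--                     depth += 1
--                 elif text[j] == ')':
--                     depth -= 1
--                     if depth == 0:
--                         break
--                 elif text[j] == '"':
--                     j += 1
--                     while j < len(text) and text[j] != '"':
--                         if text[j] == '\\':
--                             j += 1
--                         j += 1
--                 j += 1
--             # Strip preceding whitespace/newlines
--             while result and result[-1] in '\n\t\r ':
--                 result.pop()
--             i = j + 1  # skip past closing paren
--             continue
--         result.append(text[i])
--         i += 1
--     return ''.join(result)
-- ===== SOURCE B (Python) =====
-- def remove_sexp_blocks(text, tag):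
--     """
--     Remove all top-level (tag ...) s-expression blocks in ONE flat pass:
--     a character state machine (depth / in-string / escape flags) instead of
--     nested scanning loops, with an uncommitted-whitespace buffer so no
--     backtracking pop is ever needed.
--     """
--     search = '(' + tag
--     slen = len(search)
--     ws = ' \t\n\r'
--     n = len(text)
--     out = []
--     pending = []          # whitespace run not yet committed to out
--     depth = 0             # 0 = copying mode; > 0 = inside a removed block
--     in_str = False
--     esc = False
--     i = 0
--     while i < n:
--         c = text[i]
--         if depth > 0:
--             # inside a removed block: flat state machine, nothing emitted
--             if esc:
--                 esc = False
--             elif in_str: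
--                 if c == '"':
--                     in_str = False
--                 elif c == '\\':
--                     esc = True
--             elif c == '(':
--                 depth += 1
--             elif c == ')':
--                 depth -= 1
--             elif c == '"':
--                 in_str = True
--         elif (text.startswith(search, i) and i + slen < n
--               and text[i + slen] in ws):
--             depth = 1          # the '(' that opens the removed block
--             pending = []       # drop the whitespace run before the block
--         elif c in ws:
--             pending.append(c)
--         else:
--             out += pending
--             pending = []
--             out.append(c)
--         i += 1
--     out += pending
--     return ''.join(out)
-- ===== Notes on version B (the rewrite author's own statement) =====
-- stated objective: alternative
-- what changed: A nests a depth-counting scanner loop (with an inner escaped-string loop) inside the main loop and pops trailing whitespace back off its output list; B is one flat pass driven by a character state machine (depth / in-string / escape flags) with an uncommitted-whitespace buffer, so it has no inner loops and never backtracks.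
import Mathlib
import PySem

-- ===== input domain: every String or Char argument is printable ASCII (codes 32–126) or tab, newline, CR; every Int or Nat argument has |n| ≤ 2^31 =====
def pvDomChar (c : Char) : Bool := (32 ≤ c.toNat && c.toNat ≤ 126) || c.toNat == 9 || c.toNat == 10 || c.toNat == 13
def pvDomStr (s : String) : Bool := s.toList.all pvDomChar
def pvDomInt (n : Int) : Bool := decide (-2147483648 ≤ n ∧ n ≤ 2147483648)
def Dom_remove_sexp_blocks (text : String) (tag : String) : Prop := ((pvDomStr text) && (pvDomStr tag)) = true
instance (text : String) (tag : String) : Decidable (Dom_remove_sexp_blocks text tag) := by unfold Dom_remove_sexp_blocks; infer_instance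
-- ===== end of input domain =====

-- B replaces A's nested scanner loops (which also pop whitespace back off the output)
-- by one flat character state machine (depth / in-string / escape flags) with an
-- uncommitted-whitespace buffer; objective: alternative decomposition, same cost.

theorem pvDecr {n i j : Nat} (h1 : i < n) (h2 : i < j) : n - j < n - i :=
  Nat.sub_lt_sub_left h1 h2

-- ===== PORT A =====

def pvIsWs (c : Char) : Bool := c = ' ' || c = '\t' || c = '\n' || c = '\r'

-- `text[i:i+slen] == search and i+slen < len(text) and text[i+slen] in ' \t\n\r'`
def pvMatchAt (t s : List Char) (i : Nat) : Bool :=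
  ((t.drop i).take s.length == s) && decide (i + s.length < t.length)
    && pvIsWs (t.getD (i + s.length) 'x')

-- the inner `while j < len and text[j] != '"': …` escaped-literal skip
def pvSkipStr (t : List Char) (j : Nat) : Nat :=
  if h : j < t.length then
    if t[j] = '"' then j
    else if t[j] = '\\' then pvSkipStr t (j + 2) else pvSkipStr t (j + 1)
  else j
termination_by t.length - j
decreasing_by
  · exact pvDecr h (Nat.lt_succ_of_lt (Nat.lt_succ_self j))
  · exact pvDecr h (Nat.lt_succ_self j)

theorem pvSkipStr_ge (t : List Char) (j : Nat) : j ≤ pvSkipStr t j := by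
  fun_induction pvSkipStr t j <;> omega

-- the depth-counting `while j < len(text)` loop; returns the exit value of j
def pvFindClose (t : List Char) (j : Nat) (depth : Int) : Nat :=
  if h : j < t.length then
    if t[j] = '(' then pvFindClose t (j + 1) (depth + 1)
    else if t[j] = ')' then
      if depth - 1 = 0 then j else pvFindClose t (j + 1) (depth - 1)
    else if t[j] = '"' then pvFindClose t (pvSkipStr t (j + 1) + 1) depth
    else pvFindClose t (j + 1) depth
  else j
termination_by t.length - j
decreasing_by
  · exact pvDecr h (Nat.lt_succ_self j)
  · exact pvDecr h (Nat.lt_succ_self j)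
  · exact pvDecr h (Nat.lt_succ_of_lt (Nat.lt_of_lt_of_le (Nat.lt_succ_self j) (pvSkipStr_ge t (j + 1))))
  · exact pvDecr h (Nat.lt_succ_self j)

theorem pvFindClose_ge (t : List Char) (j : Nat) (d : Int) : j ≤ pvFindClose t j d := by
  fun_induction pvFindClose t j d with
  | case1 j d h hc ih => omega
  | case2 j d h hc hc2 hb => omega
  | case3 j d h hc hc2 hb ih => omega
  | case4 j d h hc hc2 hc3 ih => have := pvSkipStr_ge t (j + 1); omega
  | case5 j d h hc hc2 hc3 ih => omega
  | case6 j d h => omega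

-- `while result and result[-1] in '\n\t\r ': result.pop()` (result kept reversed)
def pvPopWs : List Char → List Char
  | [] => []
  | c :: r => if pvIsWs c then pvPopWs r else c :: r

-- A's main while loop; res is the result list reversed (append = cons)
def pvGoA (t s : List Char) (i : Nat) (res : List Char) : List Char :=
  if h : i < t.length then
    if pvMatchAt t s i then
      pvGoA t s (pvFindClose t i 0 + 1) (pvPopWs res)
    else
      pvGoA t s (i + 1) (t[i] :: res)
  else res.reverse
termination_by t.length + 1 - i
decreasing_by
  · exact pvDecr (Nat.lt_succ_of_lt h) (Nat.lt_succ_of_le (pvFindClose_ge t i 0))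
  · exact pvDecr (Nat.lt_succ_of_lt h) (Nat.lt_succ_self i)

def remove_sexp_blocks (text : String) (tag : String) : String :=
  String.ofList (pvGoA text.toList ('(' :: tag.toList) 0 [])

-- ===== PORT B =====

-- Source B's single `while i < n` loop: the whole state (depth, in_str, esc, out, pending)
-- is threaded through one structural recursion on the index; no inner loops.
def pvStepB (t s : List Char) (i : Nat) (depth : Int) (instr esc : Bool)
    (out pending : List Char) : List Char :=
  if h : i < t.length then
    let c := t[i]
    if depth > 0 then
      if esc then pvStepB t s (i + 1) depth instr false out pending
      else if instr then
        if c = '"' then pvStepB t s (i + 1) depth false false out pending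
        else if c = '\\' then pvStepB t s (i + 1) depth true true out pending
        else pvStepB t s (i + 1) depth true false out pending
      else if c = '(' then pvStepB t s (i + 1) (depth + 1) false false out pending
      else if c = ')' then pvStepB t s (i + 1) (depth - 1) false false out pending
      else if c = '"' then pvStepB t s (i + 1) depth true false out pending
      else pvStepB t s (i + 1) depth false false out pending
    else if s.isPrefixOf (t.drop i) && decide (i + s.length < t.length)
            && (t.getD (i + s.length) 'x' = ' ' || t.getD (i + s.length) 'x' = '\t'
                || t.getD (i + s.length) 'x' = '\n' || t.getD (i + s.length) 'x' = '\r') then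
      pvStepB t s (i + 1) 1 false false out []
    else if c = ' ' || c = '\t' || c = '\n' || c = '\r' then
      pvStepB t s (i + 1) 0 false false out (pending ++ [c])
    else
      pvStepB t s (i + 1) 0 false false (out ++ pending ++ [c]) []
  else out ++ pending
termination_by t.length - i
decreasing_by all_goals exact pvDecr h (Nat.lt_succ_self i)

def remove_sexp_blocks_alt (text : String) (tag : String) : String :=
  String.ofList (pvStepB text.toList ('(' :: tag.toList) 0 0 false false [] [])

-- ===== PRECONDITION & SPEC =====
def Spec_remove_sexp_blocks (text : String) (tag : String) (out : String) : Prop := out = remove_sexp_blocks_alt text tag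
instance (text : String) (tag : String) (out : String) : Decidable (Spec_remove_sexp_blocks text tag out) := by unfold Spec_remove_sexp_blocks; infer_instance

-- ===== CLAIM (what is proved, stated in full; the proofs are below) =====
def Claim_equal_remove_sexp_blocks : Prop := ∀ (text : String) (tag : String), Dom_remove_sexp_blocks text tag → Spec_remove_sexp_blocks text tag (remove_sexp_blocks text tag)

-- ===== LEMMAS AND PROOFS =====

-- B's inline match guard is A's pvMatchAt
theorem pvMatchB_eq (t s : List Char) (i : Nat) :
    (s.isPrefixOf (t.drop i) && decide (i + s.length < t.length)
      && (t.getD (i + s.length) 'x' = ' ' || t.getD (i + s.length) 'x' = '\t'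
          || t.getD (i + s.length) 'x' = '\n' || t.getD (i + s.length) 'x' = '\r'))
      = pvMatchAt t s i := by
  unfold pvMatchAt pvIsWs
  have hp : s.isPrefixOf (t.drop i) = ((t.drop i).take s.length == s) := by
    rw [Bool.eq_iff_iff, List.isPrefixOf_iff_prefix, beq_iff_eq, List.prefix_iff_eq_take]
    exact eq_comm
  rw [hp]

-- a match position starts with '(' (head of the search string)
theorem pvMatchAt_head (t s₀ : List Char) (i : Nat)
    (h : pvMatchAt t ('(' :: s₀) i = true) : ∃ hlt : i < t.length, t[i] = '(' := by
  unfold pvMatchAt at h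
  simp only [Bool.and_eq_true, beq_iff_eq, decide_eq_true_eq] at h
  obtain ⟨⟨htake, hlt⟩, -⟩ := h
  have hi : i < t.length := by omega
  refine ⟨hi, ?_⟩
  have h0 : ((t.drop i).take ('(' :: s₀).length)[0]? = some '(' := by rw [htake]; rfl
  rw [List.getElem?_take] at h0
  simp only [List.length_cons, List.getElem?_drop] at h0
  rw [if_pos (by omega)] at h0
  simp only [Nat.add_zero] at h0
  rw [List.getElem?_eq_getElem hi] at h0
  simpa using h0

theorem pvPopWs_append (l r : List Char) (h : ∀ c ∈ l, pvIsWs c = true) :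
    pvPopWs (l ++ r) = pvPopWs r := by
  induction l with
  | nil => rfl
  | cons c l ih =>
      have hc : pvIsWs c = true := h c (by simp)
      simp only [List.cons_append, pvPopWs, hc, if_pos]
      exact ih (fun d hd => h d (by simp [hd]))

-- B inside a string literal ≡ A's pvSkipStr
theorem pvL0 (t s : List Char) (j : Nat) (d : Int) (hd : 1 ≤ d) (out : List Char) :
    pvStepB t s j d true false out []
      = if _h : pvSkipStr t j < t.length then pvStepB t s (pvSkipStr t j + 1) d false false out []
        else out := by
  fun_induction pvSkipStr t j with
  | case1 j h hq =>
      rw [pvStepB, dif_pos h, if_pos (show (0:Int) < d by omega), if_neg (by simp),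
        if_pos rfl, if_pos hq, dif_pos h]
  | case2 j h hq hb ih =>
      rw [pvStepB, dif_pos h, if_pos (show (0:Int) < d by omega), if_neg (by simp),
        if_pos rfl, if_neg hq, if_pos hb]
      by_cases h1 : j + 1 < t.length
      · rw [pvStepB, dif_pos h1, if_pos (show (0:Int) < d by omega), if_pos rfl]
        exact ih
      · have hge := pvSkipStr_ge t (j + 2)
        rw [pvStepB, dif_neg h1, dif_neg (by omega)]
        simp
  | case3 j h hq hb ih =>
      rw [pvStepB, dif_pos h, if_pos (show (0:Int) < d by omega), if_neg (by simp),
        if_pos rfl, if_neg hq, if_neg hb]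
      exact ih
  | case4 j h =>
      rw [pvStepB, dif_neg h, dif_neg (by omega)]
      simp

-- B inside a removed block ≡ A's pvFindClose (A continues just past the close paren)
theorem pvL1 (t s : List Char) (j : Nat) (d : Int) (hd : 1 ≤ d) (out : List Char) :
    pvStepB t s j d false false out []
      = pvStepB t s (pvFindClose t j d + 1) 0 false false out [] := by
  fun_induction pvFindClose t j d with
  | case1 j d h hc ih =>
      rw [pvStepB, dif_pos h, if_pos (show (0:Int) < d by omega), if_neg (by simp),
        if_neg (by simp), if_pos hc]
      exact ih (by omega)
  | case2 j d h hc hc2 hb =>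
      rw [pvStepB, dif_pos h, if_pos (show (0:Int) < d by omega), if_neg (by simp),
        if_neg (by simp), if_neg hc, if_pos hc2, hb]
  | case3 j d h hc hc2 hb ih =>
      rw [pvStepB, dif_pos h, if_pos (show (0:Int) < d by omega), if_neg (by simp),
        if_neg (by simp), if_neg hc, if_pos hc2]
      exact ih (by omega)
  | case4 j d h hc hc2 hc3 ih =>
      rw [pvStepB, dif_pos h, if_pos (show (0:Int) < d by omega), if_neg (by simp),
        if_neg (by simp), if_neg hc, if_neg hc2, if_pos hc3]
      rw [pvL0 t s (j + 1) d hd out]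
      by_cases hsl : pvSkipStr t (j + 1) < t.length
      · rw [dif_pos hsl]; exact ih hd
      · rw [dif_neg hsl]
        rw [pvFindClose, dif_neg (by omega), pvStepB, dif_neg (by omega)]
        simp
  | case5 j d h hc hc2 hc3 ih =>
      rw [pvStepB, dif_pos h, if_pos (show (0:Int) < d by omega), if_neg (by simp),
        if_neg (by simp), if_neg hc, if_neg hc2, if_neg hc3]
      exact ih hd
  | case6 j d h =>
      rw [pvStepB, dif_neg h, pvStepB, dif_neg (by omega)]

-- main correspondence: A's popping accumulator vs B's (out, pending) split
theorem pvMain (t s₀ : List Char) : ∀ (m i : Nat) (out pending : List Char),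
    t.length + 1 - i ≤ m →
    (∀ c ∈ pending, pvIsWs c = true) →
    pvPopWs out.reverse = out.reverse →
    pvGoA t ('(' :: s₀) i (pending.reverse ++ out.reverse)
      = pvStepB t ('(' :: s₀) i 0 false false out pending := by
  intro m
  induction m with
  | zero =>
      intro i out pending hm hpend hout
      rw [pvGoA, dif_neg (by omega), pvStepB, dif_neg (by omega)]
      simp
  | succ m ih =>
      intro i out pending hm hpend hout
      by_cases hi : i < t.length
      · by_cases hmt : pvMatchAt t ('(' :: s₀) i = true
        · -- a block starts here
          obtain ⟨_, hhead⟩ := pvMatchAt_head t s₀ i hmt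
          have hfc := pvFindClose_ge t (i + 1) 1
          rw [pvGoA, dif_pos hi, if_pos hmt]
          rw [pvPopWs_append _ _ (by intro c hc; exact hpend c (by simpa using hc)), hout]
          have hun : pvFindClose t i 0 = pvFindClose t (i + 1) 1 := by
            rw [pvFindClose, dif_pos hi, if_pos hhead]
            norm_num
          have hA := ih (pvFindClose t (i + 1) 1 + 1) out [] (by omega) (by simp) hout
          simp only [List.reverse_nil, List.nil_append] at hA
          conv_rhs => rw [pvStepB]
          rw [dif_pos hi, if_neg (show ¬((0:Int) > 0) by omega),
            if_pos (by rw [pvMatchB_eq]; exact hmt)]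
          rw [pvL1 t ('(' :: s₀) (i + 1) 1 (by omega) out]
          rw [hun]
          exact hA
        · by_cases hws : pvIsWs t[i] = true
          · -- whitespace: goes into pending
            rw [pvGoA, dif_pos hi, if_neg (by simp [hmt])]
            have e1 : (pending ++ [t[i]]).reverse ++ out.reverse
                = t[i] :: (pending.reverse ++ out.reverse) := by simp
            conv_rhs => rw [pvStepB]
            rw [dif_pos hi, if_neg (show ¬((0:Int) > 0) by omega),
              if_neg (by rw [pvMatchB_eq]; exact hmt),
              if_pos (by simpa [pvIsWs] using hws)]
            rw [← e1]
            exact ih (i + 1) out (pending ++ [t[i]]) (by omega)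
              (by intro c hc
                  rcases List.mem_append.mp hc with h1 | h2
                  · exact hpend c h1
                  · simp only [List.mem_singleton] at h2; subst h2; exact hws) hout
          · -- ordinary character: flush pending, emit it
            rw [pvGoA, dif_pos hi, if_neg (by simp [hmt])]
            have e2 : (out ++ pending ++ [t[i]]).reverse
                = t[i] :: (pending.reverse ++ out.reverse) := by simp
            have hout' : pvPopWs (out ++ pending ++ [t[i]]).reverse
                = (out ++ pending ++ [t[i]]).reverse := by
              rw [e2]
              simp [pvPopWs, hws]
            have e3 : ([] : List Char).reverse ++ (out ++ pending ++ [t[i]]).reverse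
                = t[i] :: (pending.reverse ++ out.reverse) := by rw [e2]; simp
            conv_rhs => rw [pvStepB]
            rw [dif_pos hi, if_neg (show ¬((0:Int) > 0) by omega),
              if_neg (by rw [pvMatchB_eq]; exact hmt),
              if_neg (by simpa [pvIsWs] using hws)]
            rw [← e3]
            exact ih (i + 1) (out ++ pending ++ [t[i]]) [] (by omega) (by simp) hout'
      · rw [pvGoA, dif_neg hi, pvStepB, dif_neg hi]
        simp

-- ===== VERDICT (by name: the statement is the Claim_ definition above) =====
theorem remove_sexp_blocks_spec : Claim_equal_remove_sexp_blocks := by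
  intro text tag _
  unfold Spec_remove_sexp_blocks remove_sexp_blocks remove_sexp_blocks_alt
  have := pvMain text.toList tag.toList (text.toList.length + 1) 0 [] [] (by omega)
    (by simp) rfl
  simpa using congrArg String.ofList this
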